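-- pv_equiv track=rewrite | github.com/TIKIYEON/Digitizing-overlapping-curves | las-graph-maker/v1.py | find_header_and_graph
-- ===== SOURCE A (Python) =====
-- def find_header_and_graph(mask):
--     sections = []
--     is_section = False
--     section_start = 0
--
--     for i, active in enumerate(mask):
--         if active and not is_section:
--             # Section start
--             section_start = i
--             is_section = True
--         elif not active and is_section:
--             # Section end
--             sections.append((section_start, i-1))
--             is_section = False
--     if is_section:
--         sections.append((section_start, len(mask)-1))
--     return sections
-- ===== SOURCE B (Python) =====
-- def find_header_and_graph(mask):
--     m = list(mask)
--     starts = [i for i, (prev, cur) in enumerate(zip([False] + m, m)) if cur and not prev]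
--     ends = [i for i, (cur, nxt) in enumerate(zip(m, m[1:] + [False])) if cur and not nxt]
--     return list(zip(starts, ends))
-- ===== Notes on version B (the rewrite author's own statement) =====
-- stated objective: alternative
-- what changed: Replaces the stateful flag-and-remembered-start loop by two stateless edge scans (rising edges via zip with the shifted-right list, falling edges via zip with the shifted-left list) paired with zip.
import Mathlib
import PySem

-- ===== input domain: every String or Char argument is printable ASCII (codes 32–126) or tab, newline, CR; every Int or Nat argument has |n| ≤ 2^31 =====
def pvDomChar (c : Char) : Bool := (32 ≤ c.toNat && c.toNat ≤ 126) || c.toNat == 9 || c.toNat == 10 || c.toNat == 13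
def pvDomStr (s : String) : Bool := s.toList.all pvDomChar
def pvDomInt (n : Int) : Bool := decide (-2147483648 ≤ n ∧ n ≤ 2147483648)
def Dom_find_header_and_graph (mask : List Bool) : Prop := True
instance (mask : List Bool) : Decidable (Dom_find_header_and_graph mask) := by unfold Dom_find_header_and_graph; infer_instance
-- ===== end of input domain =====

-- B replaces A's stateful flag-and-remembered-start loop by two stateless edge scans
-- (rising/falling edges via zips with the shifted list) paired with zip (objective: alternative).

-- ===== PORT A =====
-- literal transliteration of A's loop: state = (sections, is_section, section_start)
def find_header_and_graph (mask : List Bool) : List (Int × Int) :=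
  let r := (PySem.List.enumerate mask).foldl
    (fun (st : List (Int × Int) × Bool × Int) (p : Int × Bool) =>
      if p.2 && !st.2.1 then (st.1, true, p.1)
      else if !p.2 && st.2.1 then (st.1 ++ [(st.2.2, p.1 - 1)], false, st.2.2)
      else st) ([], false, 0)
  if r.2.1 then r.1 ++ [(r.2.2, (mask.length : Int) - 1)] else r.1

-- ===== PORT B =====
-- literal transliteration of Source B: the comprehensions 'enumerate(zip(...)) with filter'
-- are ported as enumerate + filterMap; m[1:] is PySem.List.slice m 1 none.
def find_header_and_graph_alt (mask : List Bool) : List (Int × Int) :=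
  let m := mask
  let starts := (PySem.List.enumerate ((false :: m).zip m)).filterMap
    (fun p => if p.2.2 && !p.2.1 then some p.1 else none)
  let ends := (PySem.List.enumerate (m.zip (PySem.List.slice m (some 1) none ++ [false]))).filterMap
    (fun p => if p.2.1 && !p.2.2 then some p.1 else none)
  starts.zip ends

-- ===== PRECONDITION & SPEC =====
def Spec_find_header_and_graph (mask : List Bool) (out : List (Int × Int)) : Prop := out = find_header_and_graph_alt mask
instance (mask : List Bool) (out : List (Int × Int)) : Decidable (Spec_find_header_and_graph mask out) := by unfold Spec_find_header_and_graph; infer_instance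

-- ===== CLAIM (what is proved, stated in full; the proofs are below) =====
def Claim_equal_find_header_and_graph : Prop := ∀ (mask : List Bool), Dom_find_header_and_graph mask → Spec_find_header_and_graph mask (find_header_and_graph mask)

-- ===== LEMMAS AND PROOFS =====

-- canonical runs function: i = current index, cur = start of the open section (if any)
def pvRuns (i : Int) (cur : Option Int) : List Bool → List (Int × Int)
  | [] => match cur with | none => [] | some s => [(s, i - 1)]
  | b :: t => match cur with
    | none => if b then pvRuns (i + 1) (some i) t else pvRuns (i + 1) none t
    | some s => if b then pvRuns (i + 1) (some s) t else (s, i - 1) :: pvRuns (i + 1) none t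

-- rising edges of the suffix, p = previous element
def pvStarts (i : Int) (p : Bool) : List Bool → List Int
  | [] => []
  | b :: t => (if b && !p then [i] else []) ++ pvStarts (i + 1) b t

-- falling edges of the suffix (next element looked up in the tail, absent = false)
def pvEnds (i : Int) : List Bool → List Int
  | [] => []
  | b :: t => (if b && !(t.headD false) then [i] else []) ++ pvEnds (i + 1) t

-- A's loop computes pvRuns
theorem pvA_loop (t : List Bool) : ∀ (i : Int) (acc : List (Int × Int)) (b : Bool) (s0 : Int),
    (let r := (PySem.List.enumerate t i).foldl
      (fun (st : List (Int × Int) × Bool × Int) (p : Int × Bool) =>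
        if p.2 && !st.2.1 then (st.1, true, p.1)
        else if !p.2 && st.2.1 then (st.1 ++ [(st.2.2, p.1 - 1)], false, st.2.2)
        else st) (acc, b, s0)
     if r.2.1 then r.1 ++ [(r.2.2, i + (t.length : Int) - 1)] else r.1)
    = acc ++ pvRuns i (if b then some s0 else none) t := by
  induction t with
  | nil =>
    intro i acc b s0
    cases b <;> simp [PySem.List.enumerate_nil, pvRuns]
  | cons c u ih =>
    intro i acc b s0
    simp only [PySem.List.enumerate_cons, List.foldl_cons, List.length_cons]
    push_cast
    rw [show i + ((u.length : Int) + 1) - 1 = i + 1 + (u.length : Int) - 1 from by ring]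
    cases b <;> cases c
    · simpa [pvRuns] using ih (i + 1) acc false s0
    · simpa [pvRuns] using ih (i + 1) acc true i
    · simpa [pvRuns] using ih (i + 1) (acc ++ [(s0, i - 1)]) false s0
    · simpa [pvRuns] using ih (i + 1) acc true s0

theorem pvA_eq_runs (mask : List Bool) : find_header_and_graph mask = pvRuns 0 none mask := by
  have h := pvA_loop mask 0 [] false 0
  simpa [find_header_and_graph] using h

-- B's starts comprehension computes pvStarts
theorem pvB_starts (m : List Bool) : ∀ (i : Int) (p : Bool),
    (PySem.List.enumerate ((p :: m).zip m) i).filterMap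
      (fun q => if q.2.2 && !q.2.1 then some q.1 else none) = pvStarts i p m := by
  induction m with
  | nil => intro i p; simp [pvStarts, PySem.List.enumerate_nil]
  | cons b t ih =>
    intro i p
    simp only [List.zip_cons_cons, PySem.List.enumerate_cons, List.filterMap_cons, pvStarts]
    rw [ih (i + 1) b]
    cases b <;> cases p <;> simp

-- the shifted-left zip unfolds structurally
theorem pvZipNext (b : Bool) (t : List Bool) :
    (b :: t).zip ((PySem.List.slice (b :: t) (some 1) none) ++ [false])
      = (b, t.headD false) :: t.zip ((PySem.List.slice t (some 1) none) ++ [false]) := by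
  cases t with
  | nil => simp [PySem.List.slice_from_one]
  | cons c u => simp [PySem.List.slice_from_one]

-- B's ends comprehension computes pvEnds
theorem pvB_ends (m : List Bool) : ∀ (i : Int),
    (PySem.List.enumerate (m.zip ((PySem.List.slice m (some 1) none) ++ [false])) i).filterMap
      (fun q => if q.2.1 && !q.2.2 then some q.1 else none) = pvEnds i m := by
  induction m with
  | nil => intro i; simp [pvEnds, PySem.List.enumerate_nil]
  | cons b t ih =>
    intro i
    rw [pvZipNext]
    simp only [PySem.List.enumerate_cons, List.filterMap_cons, pvEnds]
    rw [ih (i + 1)]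
    cases b <;> cases h : t.headD false <;> simp [h]

-- flipping a negated if-condition on booleans
theorem pvFlip (x : Bool) (i : Int) : (if !x then [i] else ([] : List Int)) = (if x then [] else [i]) := by
  cases x <;> rfl

-- the pairing invariant: zipping the edge lists rebuilds the runs
theorem pvZipInv (t : List Bool) :
    (∀ i : Int, (pvStarts i false t).zip (pvEnds i t) = pvRuns i none t) ∧
    (∀ (i s : Int), (s :: pvStarts (i + 1) true t).zip
        ((if t.headD false then [] else [i]) ++ pvEnds (i + 1) t) = pvRuns (i + 1) (some s) t) := by
  induction t with
  | nil =>
    constructor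
    · intro i; simp [pvStarts, pvEnds, pvRuns]
    · intro i s; simp [pvStarts, pvEnds, pvRuns]
  | cons c u ih =>
    constructor
    · intro i
      cases c with
      | false =>
        simp only [pvStarts, pvEnds, pvRuns, Bool.false_and, Bool.false_eq_true, if_false,
          List.nil_append]
        exact ih.1 (i + 1)
      | true =>
        simp only [pvStarts, pvEnds, pvRuns, Bool.not_false, Bool.and_self, Bool.true_and,
          reduceIte, List.singleton_append]
        rw [pvFlip]
        exact ih.2 i i
    · intro i s
      cases c with
      | false =>
        simp only [pvStarts, pvEnds, pvRuns, List.headD_cons, Bool.false_and, Bool.not_true,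
          Bool.false_eq_true, if_false, List.nil_append, List.singleton_append,
          List.zip_cons_cons]
        rw [ih.1 (i + 1 + 1), show (i : Int) + 1 - 1 = i from by ring]
      | true =>
        simp only [pvStarts, pvEnds, pvRuns, List.headD_cons, Bool.not_true, Bool.and_false,
          Bool.true_and, Bool.false_eq_true, if_false, reduceIte, List.nil_append]
        rw [pvFlip]
        exact ih.2 (i + 1) s

theorem pvB_eq_runs (mask : List Bool) : find_header_and_graph_alt mask = pvRuns 0 none mask := by
  show ((PySem.List.enumerate ((false :: mask).zip mask) 0).filterMap
      (fun p => if p.2.2 && !p.2.1 then some p.1 else none)).zip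
    ((PySem.List.enumerate (mask.zip ((PySem.List.slice mask (some 1) none) ++ [false])) 0).filterMap
      (fun p => if p.2.1 && !p.2.2 then some p.1 else none)) = pvRuns 0 none mask
  rw [pvB_starts, pvB_ends]
  exact (pvZipInv mask).1 0

-- ===== VERDICT (by name: the statement is the Claim_ definition above) =====
theorem find_header_and_graph_spec : Claim_equal_find_header_and_graph := by
  intro mask _
  show find_header_and_graph mask = find_header_and_graph_alt mask
  rw [pvA_eq_runs, pvB_eq_runs]
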